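-- pv_equiv track=rewrite | github.com/RaulAdSe/garmin_trainer | training-analyzer/src/metrics/power.py | calculate_power_zones
-- ===== SOURCE A (Python) =====
-- from typing import Dict, List, Optional, Tuple
--
-- def calculate_power_zones(ftp: int) -> Dict[int, Tuple[int, int]]:
--     """
--     Calculate 7-zone power zones based on FTP.
--
--     Uses the classic Coggan power zones model:
--     - Zone 1: Active Recovery (<55% FTP) - Very easy spinning
--     - Zone 2: Endurance (55-75% FTP) - Aerobic base training
--     - Zone 3: Tempo (75-90% FTP) - Sustainable but uncomfortable
--     - Zone 4: Threshold (90-105% FTP) - At or near FTP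
--     - Zone 5: VO2max (105-120% FTP) - Hard intervals
--     - Zone 6: Anaerobic (120-150% FTP) - Short, very hard efforts
--     - Zone 7: Neuromuscular (>150% FTP) - Maximal sprints
--
--     Args:
--         ftp: Functional Threshold Power in watts
--
--     Returns:
--         Dictionary mapping zone number (1-7) to (min_watts, max_watts) tuple
--     """
--     if ftp <= 0:
--         return {i: (0, 0) for i in range(1, 8)}
--
--     return {
--         1: (0, int(ftp * 0.55)),
--         2: (int(ftp * 0.55), int(ftp * 0.75)),
--         3: (int(ftp * 0.75), int(ftp * 0.90)),
--         4: (int(ftp * 0.90), int(ftp * 1.05)),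
--         5: (int(ftp * 1.05), int(ftp * 1.20)),
--         6: (int(ftp * 1.20), int(ftp * 1.50)),
--         7: (int(ftp * 1.50), int(ftp * 3.00)),  # Upper bound for practical purposes
--     }
-- ===== SOURCE B (Python) =====
-- def _build(ftp, mults, i, lo):
--     # recursively build zones i..7, threading the shared lower bound
--     if not mults:
--         return {}
--     hi = int(ftp * mults[0])
--     d = {i: (lo, hi)}
--     d.update(_build(ftp, mults[1:], i + 1, hi))
--     return d
--
--
-- def calculate_power_zones(ftp: int):
--     if ftp <= 0:
--         return {i: (0, 0) for i in range(1, 8)}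
--     return _build(ftp, [0.55, 0.75, 0.90, 1.05, 1.20, 1.50, 3.00], 1, 0)
-- ===== Notes on version B (the rewrite author's own statement) =====
-- stated objective: alternative
-- what changed: B replaces A's flat dict literal by a recursive builder that consumes the multiplier list and threads the shared boundary as an accumulator: each boundary is computed once as a zone's upper bound and passed down as the next zone's lower bound, the dict being assembled zone by zone by the recursion.
import Mathlib
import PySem

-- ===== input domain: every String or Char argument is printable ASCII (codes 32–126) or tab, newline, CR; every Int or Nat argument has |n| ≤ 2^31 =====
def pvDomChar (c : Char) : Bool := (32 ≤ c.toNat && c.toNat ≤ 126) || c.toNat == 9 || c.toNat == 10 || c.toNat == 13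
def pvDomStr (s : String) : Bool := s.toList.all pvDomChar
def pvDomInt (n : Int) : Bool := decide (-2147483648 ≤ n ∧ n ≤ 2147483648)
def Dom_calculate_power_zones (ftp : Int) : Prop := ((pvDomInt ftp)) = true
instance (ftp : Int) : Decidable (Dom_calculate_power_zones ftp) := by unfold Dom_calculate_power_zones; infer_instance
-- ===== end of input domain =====

-- B builds the zone dict by recursion over the multiplier list, threading each computed
-- boundary down as the next zone's lower bound, instead of A's flat dict literal.

-- Shared float-semantics helper (exact model of Python's 'int(ftp * c)' where c is a
-- binary64 literal given as the exact fraction M / 2^k): the product ftp*M/2^k is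
-- rounded to the nearest binary64 (ties to even) and truncated toward zero.
-- Exact for |ftp| ≤ 2^31 (no overflow, no subnormals), which covers Dom_.
def pyFMulTrunc (ftp : Int) (M : Int) (k : Nat) : Int :=
  let n := ftp * M
  if n = 0 then 0 else
  let a := n.natAbs
  let b := Nat.log2 a + 1          -- bit length of a
  let qe : Nat × Int :=
    if b ≤ 53 then (a, -(k : Int)) -- exact: fits in the 53-bit significand
    else
      let s := b - 53
      let half := 2 ^ (s - 1)
      let q0 := a / 2 ^ s
      let r := a % 2 ^ s
      let q := if half < r ∨ (r = half ∧ q0 % 2 = 1) then q0 + 1 else q0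
      if q = 2 ^ 53 then (2 ^ 52, ((s : Int) + 1) - k) else (q, (s : Int) - k)
  let v : Int := if 0 ≤ qe.2 then (qe.1 : Int) * 2 ^ qe.2.toNat
                 else ((qe.1 / 2 ^ (-qe.2).toNat : Nat) : Int)
  if n < 0 then -v else v

-- ===== PORT A =====
def calculate_power_zones (ftp : Int) : List (Int × Int × Int) :=
  if ftp ≤ 0 then (PySem.List.pyRange 1 8 1).map (fun i => (i, 0, 0))
  else
    [(1, 0, pyFMulTrunc ftp 2476979795053773 52),
     (2, pyFMulTrunc ftp 2476979795053773 52, pyFMulTrunc ftp 3 2),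
     (3, pyFMulTrunc ftp 3 2, pyFMulTrunc ftp 8106479329266893 53),
     (4, pyFMulTrunc ftp 8106479329266893 53, pyFMulTrunc ftp 4728779608739021 52),
     (5, pyFMulTrunc ftp 4728779608739021 52, pyFMulTrunc ftp 5404319552844595 52),
     (6, pyFMulTrunc ftp 5404319552844595 52, pyFMulTrunc ftp 3 1),
     (7, pyFMulTrunc ftp 3 1, pyFMulTrunc ftp 3 0)]

-- ===== PORT B =====
-- the seven zone-top multipliers (0.55, 0.75, 0.90, 1.05, 1.20, 1.50, 3.00)
-- as exact binary64 fractions M / 2^k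
def pvBMults : List (Int × Nat) :=
  [(2476979795053773, 52), (3, 2), (8106479329266893, 53),
   (4728779608739021, 52), (5404319552844595, 52), (3, 1), (3, 0)]

-- _build(ftp, mults, i, lo): zone i gets (lo, hi) where hi = int(ftp*mults[0]);
-- hi is threaded down as zone i+1's lower bound
def pvBuild (ftp : Int) : List (Int × Nat) → Int → Int → List (Int × Int × Int)
  | [], _, _ => []
  | (M, k) :: rest, i, lo =>
      let hi := pyFMulTrunc ftp M k
      (i, lo, hi) :: pvBuild ftp rest (i + 1) hi

def calculate_power_zones_alt (ftp : Int) : List (Int × Int × Int) :=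
  if ftp ≤ 0 then (PySem.List.pyRange 1 8 1).map (fun i => (i, 0, 0))
  else pvBuild ftp pvBMults 1 0

-- ===== PRECONDITION & SPEC =====
def Spec_calculate_power_zones (ftp : Int) (out : List (Int × Int × Int)) : Prop := out = calculate_power_zones_alt ftp
instance (ftp : Int) (out : List (Int × Int × Int)) : Decidable (Spec_calculate_power_zones ftp out) := by unfold Spec_calculate_power_zones; infer_instance

-- ===== CLAIM (what is proved, stated in full; the proofs are below) =====
def Claim_equal_calculate_power_zones : Prop := ∀ (ftp : Int), Dom_calculate_power_zones ftp → Spec_calculate_power_zones ftp (calculate_power_zones ftp)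

-- ===== LEMMAS AND PROOFS =====

-- ===== VERDICT (by name: the statement is the Claim_ definition above) =====
theorem calculate_power_zones_spec : Claim_equal_calculate_power_zones := by
  intro ftp _
  unfold Spec_calculate_power_zones calculate_power_zones calculate_power_zones_alt
  by_cases h : ftp ≤ 0
  · simp [h]
  · simp [h, pvBMults, pvBuild]
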